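-- pv_equiv track=rewrite | github.com/Capta7nBlack/RegisterBot | reader.py | dict_reader_seminar
-- ===== SOURCE A (Python) =====
-- def dict_reader_seminar(dict, course):
--     sections = []
--
--
--
--
--     inside_keys = list(dict[course].keys())
--
--     values = list(dict[course].values())
--
--
--     for idx, inside_key in enumerate(inside_keys):
--
--         if inside_keys[idx] == 'seminar':
--             sections.append(f'Section {values[idx]}')
--             return sections[0]
--     else:
--         return None
-- ===== SOURCE B (Python) =====
-- def dict_reader_seminar(dict, course):
--     inner = dict[course]
--     if 'seminar' in inner:
--         return f'Section {inner["seminar"]}'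
--     return None
-- ===== Notes on version B (the rewrite author's own statement) =====
-- stated objective: simpler
-- what changed: Replaced building the keys and values lists and the enumerate/index scan by a single dict membership test plus direct subscript lookup.
import Mathlib
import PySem

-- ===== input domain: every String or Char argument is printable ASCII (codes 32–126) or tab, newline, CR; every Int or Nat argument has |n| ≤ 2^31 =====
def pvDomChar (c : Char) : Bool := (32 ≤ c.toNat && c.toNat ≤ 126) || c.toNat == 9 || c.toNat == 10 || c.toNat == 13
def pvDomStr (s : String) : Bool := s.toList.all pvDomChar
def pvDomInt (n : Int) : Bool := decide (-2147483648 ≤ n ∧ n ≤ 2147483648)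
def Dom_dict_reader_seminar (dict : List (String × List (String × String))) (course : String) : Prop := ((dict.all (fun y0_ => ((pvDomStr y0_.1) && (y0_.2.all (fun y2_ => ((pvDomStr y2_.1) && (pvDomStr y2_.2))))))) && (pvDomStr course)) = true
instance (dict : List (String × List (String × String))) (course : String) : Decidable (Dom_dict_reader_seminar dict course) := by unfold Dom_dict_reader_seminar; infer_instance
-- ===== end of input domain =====

-- B replaces A's keys/values list building and enumerate/index scan by a single dict lookup (simpler).

-- ===== PORT A =====
-- the for-loop over enumerate(inside_keys), indexing inside_keys/values with idx
def pvLoopA_dict_reader_seminar : List (Int × String) → List String → List String → Option String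
  | [], _, _ => none
  | (idx, _) :: rest, inside_keys, values =>
    if PySem.List.pyGet? inside_keys idx == some "seminar" then
      match PySem.List.pyGet? values idx with
      | some v => some ("Section " ++ v)   -- sections.append(...); return sections[0]
      | none => none                        -- unreachable: idx is in range
    else pvLoopA_dict_reader_seminar rest inside_keys values

def dict_reader_seminar (dict : List (String × List (String × String))) (course : String) : Option String :=
  match (PySem.Dict.ofList dict).get? course with
  | none => none   -- KeyError in Python; excluded by Pre_
  | some inner0 =>
    let d := PySem.Dict.ofList inner0
    let inside_keys := d.keys
    let values := d.values
    pvLoopA_dict_reader_seminar (PySem.List.enumerate inside_keys) inside_keys values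

-- ===== PORT B =====
def dict_reader_seminar_alt (dict : List (String × List (String × String))) (course : String) : Option String :=
  match (PySem.Dict.ofList dict).get? course with
  | none => none   -- KeyError in Python; excluded by Pre_
  | some inner0 =>
    let inner := PySem.Dict.ofList inner0
    match inner.get? "seminar" with
    | some v => some ("Section " ++ v)
    | none => none

-- ===== PRECONDITION & SPEC =====
-- Pre_ excludes exactly the inputs where Python A (and B) raise KeyError: course not a key of dict.
def Pre_dict_reader_seminar (dict : List (String × List (String × String))) (course : String) : Prop :=
  course ∈ dict.map Prod.fst
instance (dict : List (String × List (String × String))) (course : String) : Decidable (Pre_dict_reader_seminar dict course) := by unfold Pre_dict_reader_seminar; infer_instance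

def pvWitness_dict_reader_seminar : (List (String × List (String × String))) × String :=
  ([("c", [("seminar", "1")])], "c")

def Spec_dict_reader_seminar (dict : List (String × List (String × String))) (course : String) (out : Option String) : Prop := out = dict_reader_seminar_alt dict course
instance (dict : List (String × List (String × String))) (course : String) (out : Option String) : Decidable (Spec_dict_reader_seminar dict course out) := by unfold Spec_dict_reader_seminar; infer_instance

-- ===== CLAIM (what is proved, stated in full; the proofs are below) =====
def Claim_equal_dict_reader_seminar : Prop := ∀ (dict : List (String × List (String × String))) (course : String), Dom_dict_reader_seminar dict course → Pre_dict_reader_seminar dict course → Spec_dict_reader_seminar dict course (dict_reader_seminar dict course)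

-- ===== LEMMAS AND PROOFS =====

-- first pair with key "seminar", formatted
def pvFindSem : List (String × String) → Option String
  | [] => none
  | (k, v) :: rest => if k == "seminar" then some ("Section " ++ v) else pvFindSem rest

theorem pvLoopA_spec : ∀ (ks vs pre preV : List String), pre.length = preV.length → ks.length = vs.length →
    pvLoopA_dict_reader_seminar (PySem.List.enumerate ks pre.length) (pre ++ ks) (preV ++ vs)
      = pvFindSem (ks.zip vs) := by
  intro ks
  induction ks with
  | nil =>
    intro vs pre preV _ hlen
    simp [PySem.List.enumerate_nil, pvLoopA_dict_reader_seminar]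
    cases vs <;> simp [pvFindSem]
  | cons k ks' ih =>
    intro vs pre preV hpre hlen
    cases vs with
    | nil => simp at hlen
    | cons v vs' =>
      rw [PySem.List.enumerate_cons]
      show pvLoopA_dict_reader_seminar _ _ _ = _
      rw [pvLoopA_dict_reader_seminar]
      rw [PySem.List.pyGet?_append_length]
      by_cases hk : k = "seminar"
      · subst hk
        simp only [beq_self_eq_true, if_pos]
        have : PySem.List.pyGet? (preV ++ v :: vs') ((pre.length : Int)) = some v := by
          rw [hpre]; exact PySem.List.pyGet?_append_length ..
        rw [this]
        simp [pvFindSem, List.zip]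
      · have hne : (some k == some "seminar") = false := by
          simp [hk]
        rw [hne]
        simp only [Bool.false_eq_true]
        have h1 : (pre.length : Int) + 1 = ((pre ++ [k]).length : Int) := by
          simp
        have h2 : pre ++ k :: ks' = (pre ++ [k]) ++ ks' := by simp
        have h3 : preV ++ v :: vs' = (preV ++ [v]) ++ vs' := by simp
        rw [h1, h2, h3, ih vs' (pre ++ [k]) (preV ++ [v]) (by simp [hpre]) (by simpa using hlen)]
        simp [pvFindSem, List.zip, hk]

theorem pvFindSem_eq_get? : ∀ (ls : List (String × String)),
    pvFindSem ls = ((PySem.Dict.mk ls).get? "seminar").map (fun v => "Section " ++ v) := by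
  intro ls
  induction ls with
  | nil => rfl
  | cons p rest ih =>
    obtain ⟨k, v⟩ := p
    rw [pvFindSem, PySem.Dict.get?_mk_cons]
    by_cases hk : k = "seminar" <;> simp [hk, ih]

-- ===== VERDICT (by name: the statement is the Claim_ definition above) =====
theorem dict_reader_seminar_spec : Claim_equal_dict_reader_seminar := by
  unfold Claim_equal_dict_reader_seminar
  intro dict course _ _
  unfold Spec_dict_reader_seminar dict_reader_seminar dict_reader_seminar_alt
  cases h : (PySem.Dict.ofList dict).get? course with
  | none => rfl
  | some inner0 =>
    simp only []
    set d := PySem.Dict.ofList inner0 with hd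
    have hzip : d.keys.zip d.values = d.items := by
      simp [PySem.Dict.keys, PySem.Dict.values, List.zip_map']
    have hlen : d.keys.length = d.values.length := by
      simp [PySem.Dict.keys, PySem.Dict.values]
    have hmk : PySem.Dict.mk d.items = d := PySem.Dict.ext rfl
    have := pvLoopA_spec d.keys d.values [] [] rfl hlen
    simp only [List.nil_append, List.length_nil, Nat.cast_zero] at this
    rw [this, hzip, pvFindSem_eq_get?, hmk]
    cases d.get? "seminar" <;> rfl
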